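-- pv_equiv track=rewrite | github.com/gonzaoff/Identificador | conjuntosFinal.py | combinar_grupos
-- ===== SOURCE A (Python) =====
-- def combinar_grupos(grupos, r):
--     """
--     Encuentra todas las formas de combinar r grupos de combinaciones válidas.
--     """
--     if r == 1:
--         return [[grupo] for grupo in grupos]
--
--     combinaciones_grupos = []
--     for i in range(len(grupos)):
--         for resto in combinar_grupos(grupos[i+1:], r-1):
--             combinaciones_grupos.append([grupos[i]] + resto)
--
--     return combinaciones_grupos
-- ===== SOURCE B (Python) =====
-- def combinar_grupos(grupos, r):
--     """
--     Encuentra todas las formas de combinar r grupos de combinaciones validas.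
--     Structural recursion on the list: combinations containing the first group,
--     then combinations without it (same lexicographic order, no slicing/index loop).
--     """
--     if r < 1:
--         return []
--     if r == 1:
--         return [[grupo] for grupo in grupos]
--     if not grupos:
--         return []
--     first = grupos[0]
--     rest = grupos[1:]
--     return [[first] + c for c in combinar_grupos(rest, r - 1)] + combinar_grupos(rest, r)
-- ===== Notes on version B (the rewrite author's own statement) =====
-- stated objective: alternative
-- what changed: Replaced A's recursion on r with an inner index loop over range(len) plus repeated list slicing by a head/tail structural recursion with two recursive calls (include-first vs exclude-first) and no loop or index arithmetic.
import Mathlib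
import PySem

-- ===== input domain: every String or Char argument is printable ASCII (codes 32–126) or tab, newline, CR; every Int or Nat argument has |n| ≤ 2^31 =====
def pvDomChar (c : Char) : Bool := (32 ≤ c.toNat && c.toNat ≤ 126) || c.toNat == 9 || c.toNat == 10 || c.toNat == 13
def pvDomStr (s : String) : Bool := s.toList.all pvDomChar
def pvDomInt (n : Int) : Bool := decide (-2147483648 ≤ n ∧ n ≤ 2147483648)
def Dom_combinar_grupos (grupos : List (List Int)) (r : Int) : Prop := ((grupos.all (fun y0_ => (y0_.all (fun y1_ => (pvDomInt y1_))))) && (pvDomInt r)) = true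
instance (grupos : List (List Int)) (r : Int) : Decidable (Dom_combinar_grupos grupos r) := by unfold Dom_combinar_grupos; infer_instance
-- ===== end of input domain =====

-- B restates A's r-combination generator as a head/tail structural recursion (include-first / exclude-first)
-- instead of A's recursion on r with an inner index loop and slicing; same order, same cost (objective: alternative).

-- ===== PORT A =====
-- the inner 'for i in range(len(grupos)): for resto in combinar_grupos(grupos[i+1:], r-1): append([grupos[i]] + resto)'
-- written as the obvious recursion on the index i (counting up over range(len(grupos)), appending in the same order)
mutual
def combinar_grupos (grupos : List (List Int)) (r : Int) : List (List (List Int)) :=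
  if r = 1 then grupos.map (fun grupo => [grupo])
  else combinar_grupos.loopA grupos r 0
termination_by (grupos.length, grupos.length + 1)
decreasing_by exact Prod.Lex.right _ (by omega)

def combinar_grupos.loopA (grupos : List (List Int)) (r : Int) (i : Nat) : List (List (List Int)) :=
  if _h : i < grupos.length then
    ((combinar_grupos (PySem.List.slice grupos (some ((i : Int) + 1)) none) (r - 1)).map
        (fun resto => (PySem.List.pyGetD grupos (i : Int) []) :: resto))
      ++ combinar_grupos.loopA grupos r (i + 1)
  else []
termination_by (grupos.length, grupos.length - i)
decreasing_by
  · apply Prod.Lex.left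
    have hs : (PySem.List.slice grupos (some ((i : Int) + 1)) none) = grupos.drop (i + 1) := by
      have := PySem.List.slice_from_natCast (xs := grupos) (a := i + 1)
      simpa using this
    rw [hs]; simp; omega
  · exact Prod.Lex.right _ (by omega)
end

-- ===== PORT B =====
def combinar_grupos_alt (grupos : List (List Int)) (r : Int) : List (List (List Int)) :=
  if r < 1 then []
  else if r = 1 then grupos.map (fun grupo => [grupo])
  else
    match grupos with
    | [] => []
    | first :: rest =>
        ((combinar_grupos_alt rest (r - 1)).map (fun c => first :: c))
          ++ combinar_grupos_alt rest r
termination_by grupos.length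

-- ===== PRECONDITION & SPEC =====
def Spec_combinar_grupos (grupos : List (List Int)) (r : Int) (out : List (List (List Int))) : Prop := out = combinar_grupos_alt grupos r
instance (grupos : List (List Int)) (r : Int) (out : List (List (List Int))) : Decidable (Spec_combinar_grupos grupos r out) := by unfold Spec_combinar_grupos; infer_instance

-- ===== CLAIM (what is proved, stated in full; the proofs are below) =====
def Claim_equal_combinar_grupos : Prop := ∀ (grupos : List (List Int)) (r : Int), Dom_combinar_grupos grupos r → Spec_combinar_grupos grupos r (combinar_grupos grupos r)

-- ===== LEMMAS AND PROOFS =====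

theorem slice_from_succ (grupos : List (List Int)) (i : Nat) :
    PySem.List.slice grupos (some ((i : Int) + 1)) none = grupos.drop (i + 1) := by
  have := PySem.List.slice_from_natCast (xs := grupos) (a := i + 1)
  simpa using this

theorem loopA_nil (r : Int) (i : Nat) : combinar_grupos.loopA [] r i = [] := by
  rw [combinar_grupos.loopA.eq_def]; simp

-- shifting the loop index down one on a cons cell
theorem loopA_cons (x : List Int) (rest : List (List Int)) (r : Int) (i : Nat) :
    combinar_grupos.loopA (x :: rest) r (i + 1) = combinar_grupos.loopA rest r i := by
  induction hn : rest.length - i generalizing i with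
  | zero =>
    rw [combinar_grupos.loopA.eq_def]
    rw [dif_neg (by simp only [List.length_cons]; omega)]
    rw [combinar_grupos.loopA.eq_def]
    rw [dif_neg (by omega)]
  | succ n ih =>
    rw [combinar_grupos.loopA.eq_def]
    rw [dif_pos (by simp only [List.length_cons]; omega)]
    rw [ih (i + 1) (by omega)]
    conv_rhs => rw [combinar_grupos.loopA.eq_def]
    rw [dif_pos (by omega)]
    simp only [slice_from_succ, PySem.List.pyGetD_natCast, List.drop_succ_cons,
      List.getD_cons_succ]

theorem loopA_zero_cons (x : List Int) (rest : List (List Int)) (r : Int) :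
    combinar_grupos.loopA (x :: rest) r 0 =
      ((combinar_grupos rest (r - 1)).map (fun resto => x :: resto))
        ++ combinar_grupos.loopA rest r 0 := by
  rw [combinar_grupos.loopA.eq_def]
  rw [dif_pos (by simp)]
  rw [loopA_cons]
  simp only [Nat.cast_zero, zero_add, PySem.List.slice_from_one, List.tail_cons,
    PySem.List.pyGetD_zero_cons]

-- A returns [] whenever r < 1 (nothing is ever appended below r = 1)
theorem combinar_neg (grupos : List (List Int)) : ∀ (r : Int), r < 1 → combinar_grupos grupos r = [] := by
  induction grupos with
  | nil =>
    intro r hr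
    rw [combinar_grupos.eq_def, if_neg (by omega), loopA_nil]
  | cons x rest ih =>
    intro r hr
    rw [combinar_grupos.eq_def, if_neg (by omega), loopA_zero_cons]
    rw [ih (r - 1) (by omega)]
    have h0 : combinar_grupos.loopA rest r 0 = combinar_grupos rest r := by
      rw [combinar_grupos.eq_def, if_neg (by omega)]
    rw [h0, ih r hr]
    simp

theorem combinar_eq_alt (grupos : List (List Int)) : ∀ (r : Int), combinar_grupos grupos r = combinar_grupos_alt grupos r := by
  induction grupos with
  | nil =>
    intro r
    by_cases h1 : r = 1
    · subst h1; rw [combinar_grupos.eq_def, combinar_grupos_alt.eq_def]; simp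
    · rw [combinar_grupos.eq_def, if_neg h1, loopA_nil, combinar_grupos_alt.eq_def]
      by_cases h2 : r < 1 <;> simp [h2, h1]
  | cons x rest ih =>
    intro r
    by_cases h1 : r = 1
    · subst h1; rw [combinar_grupos.eq_def, combinar_grupos_alt.eq_def]; simp
    · by_cases h2 : r < 1
      · rw [combinar_neg _ _ h2, combinar_grupos_alt.eq_def, if_pos h2]
      · rw [combinar_grupos.eq_def, if_neg h1, loopA_zero_cons]
        have h0 : combinar_grupos.loopA rest r 0 = combinar_grupos rest r := by
          rw [combinar_grupos.eq_def, if_neg h1]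
        rw [h0, ih (r - 1), ih r]
        conv_rhs => rw [combinar_grupos_alt.eq_def]
        rw [if_neg (by omega), if_neg h1]

-- ===== VERDICT (by name: the statement is the Claim_ definition above) =====
theorem combinar_grupos_spec : Claim_equal_combinar_grupos := by
  intro grupos r _
  unfold Spec_combinar_grupos
  exact combinar_eq_alt grupos r
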